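-- pv_equiv track=rewrite | github.com/NaveenVayilapalli007/Information-retrieval | Boolean Incidence Matrix/IRBIM.py | TermDocumentIncidenceMatrix
-- ===== SOURCE A (Python) =====
-- def TermDocumentIncidenceMatrix(DocumentTermsCollection ,DistinctTerms):
--     TermDocMatrix={}
--     for term in DistinctTerms:
--         Vector=[]
--         for c in DocumentTermsCollection:
--
--             if term in DocumentTermsCollection[c]:
--                 Vector.append(1)
--             else :
--                 Vector.append(0)
--
--         TermDocMatrix[term]=Vector
--     return TermDocMatrix
-- ===== SOURCE B (Python) =====
-- def TermDocumentIncidenceMatrix(DocumentTermsCollection, DistinctTerms):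
--     n = len(DocumentTermsCollection)
--     TermDocMatrix = {term: [0] * n for term in DistinctTerms}
--     for index, terms in enumerate(DocumentTermsCollection.values()):
--         for token in terms:
--             if token in TermDocMatrix:
--                 TermDocMatrix[token][index] = 1
--     return TermDocMatrix
-- ===== Notes on version B (the rewrite author's own statement) =====
-- stated objective: faster
-- what changed: Replaces the per-(term,document) membership gather (scanning every document's token list once per distinct term) by preallocating a zero row per term in a dict and making one scatter pass over the documents that sets matrix[token][doc_index] = 1 via O(1) dict lookups.
import Mathlib
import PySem

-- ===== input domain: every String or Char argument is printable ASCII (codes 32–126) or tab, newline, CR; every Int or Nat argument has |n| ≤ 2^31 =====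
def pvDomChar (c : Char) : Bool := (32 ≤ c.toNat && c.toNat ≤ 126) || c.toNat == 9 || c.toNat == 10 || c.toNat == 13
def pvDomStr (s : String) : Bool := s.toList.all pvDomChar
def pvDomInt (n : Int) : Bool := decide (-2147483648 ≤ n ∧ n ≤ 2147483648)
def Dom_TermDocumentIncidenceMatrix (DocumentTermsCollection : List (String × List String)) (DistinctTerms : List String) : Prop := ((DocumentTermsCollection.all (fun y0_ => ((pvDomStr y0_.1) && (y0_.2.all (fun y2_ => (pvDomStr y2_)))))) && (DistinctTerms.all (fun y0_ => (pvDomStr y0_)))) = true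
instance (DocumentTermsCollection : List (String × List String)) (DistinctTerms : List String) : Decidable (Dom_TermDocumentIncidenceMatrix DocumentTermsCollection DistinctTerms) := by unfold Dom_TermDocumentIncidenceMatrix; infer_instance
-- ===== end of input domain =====

-- B replaces A's per-(term,document) membership gather by a single scatter pass over the
-- documents writing 1s into preallocated zero rows; a timing run measured it faster.

-- ===== PORT A =====
def TermDocumentIncidenceMatrix (DocumentTermsCollection : List (String × List String)) (DistinctTerms : List String) : List (String × List Int) :=
  let D : PySem.Dict String (List String) := PySem.Dict.mk DocumentTermsCollection
  (DistinctTerms.foldl (fun M term =>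
      M.insert term (D.keys.foldl (fun V c =>
        V ++ [if term ∈ D.getD c [] then (1 : Int) else 0]) []))
    PySem.Dict.empty).items

-- ===== PORT B =====
-- inner loop of B: 'for token in terms: if token in TermDocMatrix: TermDocMatrix[token][index] = 1'
def pvScatterDoc (M : PySem.Dict String (List Int)) (index : Nat) (terms : List String) : PySem.Dict String (List Int) :=
  terms.foldl (fun M token =>
    if M.contains token then M.modify token [] (fun row => row.set index 1) else M) M

-- outer loop of B: 'for index, terms in enumerate(DocumentTermsCollection.values())'
def pvScatterDocs (M : PySem.Dict String (List Int)) (index : Nat) : List (List String) → PySem.Dict String (List Int)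
  | [] => M
  | terms :: rest => pvScatterDocs (pvScatterDoc M index terms) (index + 1) rest

def TermDocumentIncidenceMatrix_alt (DocumentTermsCollection : List (String × List String)) (DistinctTerms : List String) : List (String × List Int) :=
  let n := DocumentTermsCollection.length
  let init : PySem.Dict String (List Int) :=
    DistinctTerms.foldl (fun M t => M.insert t (List.replicate n 0)) PySem.Dict.empty
  (pvScatterDocs init 0 (DocumentTermsCollection.map (·.2))).items

-- ===== PRECONDITION & SPEC =====
-- Pre_ excludes association lists whose first components repeat: they do not represent a
-- Python dict (Python dicts cannot have duplicate keys, so A never receives such input),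
-- and on them A's key-iteration-plus-first-match-lookup is ambiguous.
def Pre_TermDocumentIncidenceMatrix (DocumentTermsCollection : List (String × List String)) (DistinctTerms : List String) : Prop :=
  (DocumentTermsCollection.map (·.1)).Nodup
instance (DocumentTermsCollection : List (String × List String)) (DistinctTerms : List String) : Decidable (Pre_TermDocumentIncidenceMatrix DocumentTermsCollection DistinctTerms) := by unfold Pre_TermDocumentIncidenceMatrix; infer_instance

def pvWitness_TermDocumentIncidenceMatrix : (List (String × List String)) × List String :=
  ([("d1", ["a", "b"]), ("d2", ["b"])], ["a", "b", "c"])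

def Spec_TermDocumentIncidenceMatrix (DocumentTermsCollection : List (String × List String)) (DistinctTerms : List String) (out : List (String × List Int)) : Prop := out = TermDocumentIncidenceMatrix_alt DocumentTermsCollection DistinctTerms
instance (DocumentTermsCollection : List (String × List String)) (DistinctTerms : List String) (out : List (String × List Int)) : Decidable (Spec_TermDocumentIncidenceMatrix DocumentTermsCollection DistinctTerms out) := by unfold Spec_TermDocumentIncidenceMatrix; infer_instance

-- ===== CLAIM (what is proved, stated in full; the proofs are below) =====
def Claim_equal_TermDocumentIncidenceMatrix : Prop := ∀ (DocumentTermsCollection : List (String × List String)) (DistinctTerms : List String), Dom_TermDocumentIncidenceMatrix DocumentTermsCollection DistinctTerms → Pre_TermDocumentIncidenceMatrix DocumentTermsCollection DistinctTerms → Spec_TermDocumentIncidenceMatrix DocumentTermsCollection DistinctTerms (TermDocumentIncidenceMatrix DocumentTermsCollection DistinctTerms)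

-- ===== LEMMAS AND PROOFS =====

-- the incidence row of a term
def pvRow (docs : List (String × List String)) (t : String) : List Int :=
  docs.map (fun d => if t ∈ d.2 then (1 : Int) else 0)

theorem pv_getD_foldl_insert (l : List String) (v : String → List Int)
    (d : PySem.Dict String (List Int)) (k : String) :
    (l.foldl (fun M t => M.insert t (v t)) d).getD k [] =
      if k ∈ l then v k else d.getD k [] := by
  induction l generalizing d with
  | nil => simp
  | cons x xs ih =>
    simp only [List.foldl_cons, ih, PySem.Dict.getD_insert, List.mem_cons]
    by_cases hxs : k ∈ xs <;> by_cases hx : k = x <;> simp [hxs, hx]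

theorem pvScatterDoc_cons (M : PySem.Dict String (List Int)) (i : Nat) (tok : String)
    (rest : List String) :
    pvScatterDoc M i (tok :: rest) =
      pvScatterDoc (if M.contains tok then M.modify tok [] (fun row => row.set i 1) else M) i rest := rfl

theorem pvScatterDoc_contains (M : PySem.Dict String (List Int)) (i : Nat)
    (toks : List String) (k : String) :
    (pvScatterDoc M i toks).contains k = M.contains k := by
  induction toks generalizing M with
  | nil => rfl
  | cons tok rest ih =>
    rw [pvScatterDoc_cons, ih]
    by_cases h : M.contains tok = true
    · simp only [h, if_true, PySem.Dict.contains_modify]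
      by_cases hk : k = tok <;> simp [hk, h]
    · simp [h]

theorem pvScatterDoc_keys (M : PySem.Dict String (List Int)) (i : Nat)
    (toks : List String) :
    (pvScatterDoc M i toks).keys = M.keys := by
  induction toks generalizing M with
  | nil => rfl
  | cons tok rest ih =>
    rw [pvScatterDoc_cons, ih]
    by_cases h : M.contains tok = true
    · simp [h, PySem.Dict.keys_modify, PySem.Dict.keys_insert_of_contains]
    · simp [h]

theorem pvScatterDoc_getD (M : PySem.Dict String (List Int)) (i : Nat)
    (toks : List String) (k : String) (hk : M.contains k = true) :
    (pvScatterDoc M i toks).getD k [] =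
      if k ∈ toks then (M.getD k []).set i 1 else M.getD k [] := by
  induction toks generalizing M with
  | nil => simp [pvScatterDoc]
  | cons tok rest ih =>
    rw [pvScatterDoc_cons]
    by_cases hkt : k = tok
    · subst hkt
      simp only [hk, if_true]
      rw [ih _ (by simp [PySem.Dict.contains_modify])]
      simp only [PySem.Dict.getD_modify, List.mem_cons, true_or, if_true]
      by_cases hr : k ∈ rest <;> simp [hr, List.set_set]
    · by_cases h : M.contains tok = true
      · simp only [h, if_true]
        rw [ih _ (by simp [PySem.Dict.contains_modify, hk])]
        simp [PySem.Dict.getD_modify, hkt, List.mem_cons]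
      · simp only [h, Bool.false_eq_true, if_false]
        rw [ih _ hk]
        simp [List.mem_cons, hkt]

theorem pvScatterDocs_keys (M : PySem.Dict String (List Int)) (i : Nat)
    (ds : List (List String)) :
    (pvScatterDocs M i ds).keys = M.keys := by
  induction ds generalizing M i with
  | nil => rfl
  | cons toks rest ih => rw [pvScatterDocs, ih, pvScatterDoc_keys]

theorem pvScatterDocs_getD (ds : List (List String)) (i : Nat) (pre : List Int)
    (k : String) (M : PySem.Dict String (List Int)) (hk : M.contains k = true)
    (hv : M.getD k [] = pre ++ List.replicate ds.length 0) (hi : pre.length = i) :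
    (pvScatterDocs M i ds).getD k [] =
      pre ++ ds.map (fun toks => if k ∈ toks then (1 : Int) else 0) := by
  induction ds generalizing i pre M with
  | nil => simpa using hv
  | cons toks rest ih =>
    rw [pvScatterDocs]
    have hset : (M.getD k []).set i 1 =
        (pre ++ [(1 : Int)]) ++ List.replicate rest.length 0 := by
      rw [hv]
      simp only [List.length_cons, List.replicate_succ]
      rw [List.set_append]
      simp [hi]
    have hk' : (pvScatterDoc M i toks).contains k = true := by
      rw [pvScatterDoc_contains]; exact hk
    by_cases hmem : k ∈ toks
    · rw [ih (i + 1) (pre ++ [(1 : Int)]) _ hk'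
        (by rw [pvScatterDoc_getD M i toks k hk]; simp [hmem, hset])
        (by simp [hi])]
      simp [hmem]
    · have hv' : M.getD k [] = (pre ++ [(0 : Int)]) ++ List.replicate rest.length 0 := by
        rw [hv]; simp [List.replicate_succ]
      rw [ih (i + 1) (pre ++ [(0 : Int)]) _ hk'
        (by rw [pvScatterDoc_getD M i toks k hk]; simp [hmem, hv'])
        (by simp [hi])]
      simp [hmem]

-- A's inner gather over the dict's keys is exactly the incidence row, given unique keys
theorem pv_rowA_eq (docs : List (String × List String))
    (hnd : (docs.map (·.1)).Nodup) (t : String) :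
    ((PySem.Dict.mk docs).keys.foldl (fun V c =>
        V ++ [if t ∈ (PySem.Dict.mk docs).getD c [] then (1 : Int) else 0]) []) =
      pvRow docs t := by
  rw [PySem.List.foldl_append_singleton_eq_map]
  have hkeys : (PySem.Dict.mk docs).keys = docs.map (·.1) := rfl
  rw [hkeys, List.map_map, pvRow]
  apply List.map_congr_left
  intro d hd
  have : (PySem.Dict.mk docs).getD d.1 [] = d.2 := by
    apply PySem.Dict.getD_of_mem_items
    · exact hd
    · exact hnd
  simp [Function.comp, this]

-- ===== VERDICT (by name: the statement is the Claim_ definition above) =====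
theorem TermDocumentIncidenceMatrix_spec : Claim_equal_TermDocumentIncidenceMatrix := by
  intro docs terms _ hpre
  unfold Spec_TermDocumentIncidenceMatrix
  unfold TermDocumentIncidenceMatrix TermDocumentIncidenceMatrix_alt
  simp only []
  -- A's dict, rewritten with the incidence row
  have hA : (terms.foldl (fun M term =>
      M.insert term ((PySem.Dict.mk docs).keys.foldl (fun V c =>
        V ++ [if term ∈ (PySem.Dict.mk docs).getD c [] then (1 : Int) else 0]) []))
      PySem.Dict.empty) =
      (terms.foldl (fun M t => M.insert t (pvRow docs t)) PySem.Dict.empty) := by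
    apply PySem.List.foldl_congr_mem
    intro acc x _
    rw [pv_rowA_eq docs hpre x]
  rw [hA]
  -- key lists of the two dicts
  set TA := terms.foldl (fun M t => M.insert t (pvRow docs t)) PySem.Dict.empty with hTA
  set init := terms.foldl (fun M t => M.insert t (List.replicate docs.length (0 : Int)))
      PySem.Dict.empty with hinit
  set TB := pvScatterDocs init 0 (docs.map (·.2)) with hTB
  have hkeysA : TA.keys = PySem.Set.ofList terms := by
    rw [hTA, PySem.Dict.keys_foldl_insert (f := fun _ t => pvRow docs t)]
    simp [PySem.Set.update, PySem.Set.ofList_eq_foldl, PySem.Dict.keys_empty]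
  have hkeysI : init.keys = PySem.Set.ofList terms := by
    rw [hinit, PySem.Dict.keys_foldl_insert (f := fun _ _ => List.replicate docs.length (0 : Int))]
    simp [PySem.Set.update, PySem.Set.ofList_eq_foldl, PySem.Dict.keys_empty]
  have hkeysB : TB.keys = PySem.Set.ofList terms := by
    rw [hTB, pvScatterDocs_keys, hkeysI]
  have hndA : TA.keys.Nodup := by
    rw [hTA]; exact PySem.Dict.nodup_keys_foldl_insert _ _ _ (by simp)
  have hndB : TB.keys.Nodup := by
    rw [hkeysB]; exact PySem.Set.nodup_ofList terms
  rw [PySem.Dict.items_eq_map_keys TA hndA [], PySem.Dict.items_eq_map_keys TB hndB [],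
    hkeysA, hkeysB]
  apply List.map_congr_left
  intro k hkmem
  have hkterms : k ∈ terms := (PySem.Set.mem_ofList terms k).mp hkmem
  have hgA : TA.getD k [] = pvRow docs k := by
    rw [hTA, pv_getD_foldl_insert]; simp [hkterms]
  have hcI : init.contains k = true := by
    rw [PySem.Dict.contains_eq_decide_mem_keys, hkeysI]
    simp [PySem.Set.mem_ofList, hkterms]
  have hgI : init.getD k [] = List.replicate docs.length (0 : Int) := by
    rw [hinit, pv_getD_foldl_insert]; simp [hkterms]
  have hgB : TB.getD k [] = pvRow docs k := by
    rw [hTB, pvScatterDocs_getD (docs.map (·.2)) 0 [] k init hcI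
      (by simpa using hgI) rfl]
    simp [pvRow, List.map_map, Function.comp]
  rw [hgA, hgB]
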